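-- pv_equiv track=rewrite | github.com/arthurcuri/floodfill | main.py | paint_region
-- ===== SOURCE A (Python) =====
-- from collections import deque
-- from typing import Iterable, List, Sequence, Tuple
--
-- Grid = List[List[int]]
--
-- Coord = Tuple[int, int]
--
-- def neighbors(x: int, y: int, n_rows: int, n_cols: int) -> Iterable[Coord]:
-- 	if x > 0:
-- 		yield x - 1, y
-- 	if x + 1 < n_rows:
-- 		yield x + 1, y
-- 	if y > 0:
-- 		yield x, y - 1
-- 	if y + 1 < n_cols:
-- 		yield x, y + 1
--
-- def paint_region(grid: Grid, start: Coord, color: int) -> int: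
--
-- 	x, y = start
-- 	if grid[x][y] != 0:
-- 		return 0
--
-- 	queue: deque[Coord] = deque([(x, y)])
-- 	grid[x][y] = color
-- 	painted = 1
-- 	n_rows, n_cols = len(grid), len(grid[0])
--
-- 	while queue:
-- 		cx, cy = queue.popleft()
-- 		for nx, ny in neighbors(cx, cy, n_rows, n_cols):
-- 			if grid[nx][ny] == 0:
-- 				grid[nx][ny] = color
-- 				painted += 1
-- 				queue.append((nx, ny))
-- 	return painted
-- ===== SOURCE B (Python) =====
-- def paint_region(grid, start, color):
--     x, y = start
--     if grid[x][y] != 0: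
--         return 0
--     n_rows, n_cols = len(grid), len(grid[0])
--     painted = 0
--     stack = [(x, y)]
--     while stack:
--         sx, sy = stack.pop()
--         if grid[sx][sy] != 0:
--             continue
--         lo = sy
--         while lo > 0 and grid[sx][lo - 1] == 0:
--             lo -= 1
--         hi = sy
--         while hi + 1 < n_cols and grid[sx][hi + 1] == 0:
--             hi += 1
--         for cy in range(lo, hi + 1):
--             grid[sx][cy] = color
--             painted += 1
--         for nx in (sx - 1, sx + 1):
--             if 0 <= nx < n_rows:
--                 for cy in range(lo, hi + 1):
--                     if grid[nx][cy] == 0: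
--                         stack.append((nx, cy))
--     return painted
-- ===== Notes on version B (the rewrite author's own statement) =====
-- stated objective: alternative
-- what changed: Replaces A's cell-at-a-time BFS (deque, one queue entry per painted cell) by a scanline flood fill: each popped seed paints its whole contiguous horizontal run of 0-cells at once and only 0-cells in the rows above/below the run are pushed as new seeds.
-- outside the precondition, e.g. on paint_region([[0, 0, 0], [1, 1, 0], [1, 1, 0]], (0, -1), 7): A returns 5, B returns 6; on paint_region([[0], [1, 0]], (0, 0), 5): A returns 1, B returns 1; on paint_region([[0]], (0, 0), 0): A returns 1, B returns 1
import Mathlib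
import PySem

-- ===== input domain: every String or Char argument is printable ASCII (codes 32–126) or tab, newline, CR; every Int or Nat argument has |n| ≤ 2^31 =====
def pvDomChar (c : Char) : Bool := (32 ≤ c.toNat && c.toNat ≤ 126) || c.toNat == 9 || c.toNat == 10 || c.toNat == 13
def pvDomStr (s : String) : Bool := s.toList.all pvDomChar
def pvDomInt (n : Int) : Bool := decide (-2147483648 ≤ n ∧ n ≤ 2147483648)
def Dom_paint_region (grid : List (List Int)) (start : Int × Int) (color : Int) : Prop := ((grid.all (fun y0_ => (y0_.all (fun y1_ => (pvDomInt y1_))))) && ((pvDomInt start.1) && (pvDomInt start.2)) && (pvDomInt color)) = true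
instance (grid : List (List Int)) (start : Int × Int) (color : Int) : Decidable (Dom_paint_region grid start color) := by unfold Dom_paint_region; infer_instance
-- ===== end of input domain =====

-- B replaces A's cell-at-a-time BFS queue by a scanline fill (paint whole horizontal
-- runs, seed the rows above/below), a different traversal; equivalence is about the
-- return value only (both Pythons also mutate `grid` identically on Pre_ inputs).

-- ===== PORT A =====

-- grid[x][y] (Python indexing, negative wraps); IndexError ↦ junk 0, never reached under Pre_
def pvCell (g : List (List Int)) (x y : Int) : Int :=
  ((PySem.List.pyGet? g x).bind (fun row => PySem.List.pyGet? row y)).getD 0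

-- grid[x][y] = v (Python indexing); out-of-range ↦ no-op, never reached under Pre_
def pvSetCell (g : List (List Int)) (x y v : Int) : List (List Int) :=
  if (PySem.List.pyGet? g x).isSome
  then PySem.List.pySetD g x (PySem.List.pySetD ((PySem.List.pyGet? g x).getD []) y v)
  else g

-- the generator `neighbors`, as the list it yields
def pvNeighbors (x y n_rows n_cols : Int) : List (Int × Int) :=
  (if 0 < x then [(x - 1, y)] else []) ++
  (if x + 1 < n_rows then [(x + 1, y)] else []) ++
  (if 0 < y then [(x, y - 1)] else []) ++
  (if y + 1 < n_cols then [(x, y + 1)] else [])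

-- body of A's `for nx, ny in neighbors(...)` loop; state = (grid, painted, queue)
def pvBfsStep (color : Int) (st : List (List Int) × Int × List (Int × Int)) (c : Int × Int) :
    List (List Int) × Int × List (Int × Int) :=
  if pvCell st.1 c.1 c.2 = 0 then (pvSetCell st.1 c.1 c.2 color, st.2.1 + 1, st.2.2 ++ [c])
  else st

-- A's `while queue` loop; the fuel only makes the recursion total (A diverges when
-- color = 0 on a 0 start cell with a 0 neighbour, which Pre_ excludes; on Pre_ inputs
-- the fuel passed below is proved never to run out)
def pvBfsLoop (color n_rows n_cols : Int) : Nat → List (List Int) → List (Int × Int) → Int → Int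
  | 0, _, _, painted => painted
  | fuel + 1, g, q, painted =>
    match q with
    | [] => painted
    | c :: rest =>
      let st := (pvNeighbors c.1 c.2 n_rows n_cols).foldl (pvBfsStep color) (g, painted, rest)
      pvBfsLoop color n_rows n_cols fuel st.1 st.2.2 st.2.1

def paint_region (grid : List (List Int)) (start : Int × Int) (color : Int) : Int :=
  if pvCell grid start.1 start.2 ≠ 0 then 0
  else
    let g := pvSetCell grid start.1 start.2 color
    pvBfsLoop color g.length ((g.headD []).length)
      (2 * g.length * (g.headD []).length + 1) g [(start.1, start.2)] 1

-- ===== PORT B =====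

-- `while lo > 0 and grid[sx][lo-1] == 0: lo -= 1`
def pvScanL (g : List (List Int)) (sx lo : Int) : Int :=
  if h : 0 < lo ∧ pvCell g sx (lo - 1) = 0 then pvScanL g sx (lo - 1) else lo
termination_by lo.toNat
decreasing_by omega

-- `while hi + 1 < n_cols and grid[sx][hi+1] == 0: hi += 1`
def pvScanR (g : List (List Int)) (sx hi n_cols : Int) : Int :=
  if h : hi + 1 < n_cols ∧ pvCell g sx (hi + 1) = 0 then pvScanR g sx (hi + 1) n_cols else hi
termination_by (n_cols - hi).toNat
decreasing_by omega

-- `for cy in range(lo, hi+1): grid[sx][cy] = color; painted += 1`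
def pvPaintRow (color sx : Int) (cys : List Int) (st : List (List Int) × Int) :
    List (List Int) × Int :=
  cys.foldl (fun st cy => (pvSetCell st.1 sx cy color, st.2 + 1)) st

-- `for nx in (sx-1, sx+1): if 0 <= nx < n_rows: for cy in range(lo, hi+1): if grid[nx][cy] == 0: stack.append((nx, cy))`
def pvSeeds (g : List (List Int)) (n_rows lo hi : Int) (stk : List (Int × Int)) (sx : Int) :
    List (Int × Int) :=
  [sx - 1, sx + 1].foldl (fun stk nx =>
    if 0 ≤ nx ∧ nx < n_rows then
      (PySem.List.pyRange lo (hi + 1) 1).foldl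
        (fun s cy => if pvCell g nx cy = 0 then s ++ [(nx, cy)] else s) stk
    else stk) stk

-- B's `while stack` loop (stack top = list end, as Python append/pop); the fuel only
-- makes the recursion total and is proved never to run out on Pre_ inputs
def pvScanLoop (color n_rows n_cols : Int) : Nat → List (List Int) → List (Int × Int) → Int → Int
  | 0, _, _, painted => painted
  | fuel + 1, g, stk, painted =>
    match stk.getLast? with
    | none => painted
    | some s =>
      let rest := stk.dropLast
      if pvCell g s.1 s.2 ≠ 0 then pvScanLoop color n_rows n_cols fuel g rest painted
      else
        let lo := pvScanL g s.1 s.2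
        let hi := pvScanR g s.1 s.2 n_cols
        let st := pvPaintRow color s.1 (PySem.List.pyRange lo (hi + 1) 1) (g, painted)
        pvScanLoop color n_rows n_cols fuel st.1 (pvSeeds st.1 n_rows lo hi rest s.1) st.2

def paint_region_alt (grid : List (List Int)) (start : Int × Int) (color : Int) : Int :=
  if pvCell grid start.1 start.2 ≠ 0 then 0
  else
    pvScanLoop color grid.length ((grid.headD []).length)
      ((2 * (grid.headD []).length + 2) * (grid.length * (grid.headD []).length) + 1)
      grid [(start.1, start.2)] 0

-- ===== PRECONDITION & SPEC =====
-- Pre_ requires the start cell to be readable (no IndexError) and, when that cell is 0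
-- (so a fill actually runs), additionally excludes: ragged grids (the fill raises
-- IndexError as soon as it reaches a row shorter than row 0 — which ragged grids escape
-- that depends on reachability, an accident); negative in-range starts, where A wraps the
-- first read/write but then explores from the unwrapped coordinates — B wraps differently
-- and neither value is canonical; and color = 0, where A loops forever whenever the start
-- has a 0 neighbour. Inputs whose start cell is nonzero are all admitted.
def Pre_paint_region (grid : List (List Int)) (start : Int × Int) (color : Int) : Prop :=
  PySem.Raise.InRange grid.length start.1 ∧
  PySem.Raise.InRange ((PySem.List.pyGet? grid start.1).getD []).length start.2 ∧
  (pvCell grid start.1 start.2 ≠ 0 ∨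
    ((∀ row ∈ grid, row.length = (grid.headD []).length) ∧
     0 ≤ start.1 ∧ start.1 < (grid.length : Int) ∧
     0 ≤ start.2 ∧ start.2 < ((grid.headD []).length : Int) ∧ color ≠ 0))

instance (grid : List (List Int)) (start : Int × Int) (color : Int) :
    Decidable (Pre_paint_region grid start color) := by unfold Pre_paint_region; infer_instance

def pvWitness_paint_region : List (List Int) × (Int × Int) × Int := ([[0, 1], [0, 0]], (0, 0), 7)

def Spec_paint_region (grid : List (List Int)) (start : Int × Int) (color : Int) (out : Int) : Prop := out = paint_region_alt grid start color
instance (grid : List (List Int)) (start : Int × Int) (color : Int) (out : Int) : Decidable (Spec_paint_region grid start color out) := by unfold Spec_paint_region; infer_instance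

-- ===== CLAIM (what is proved, stated in full; the proofs are below) =====
def Claim_equal_paint_region : Prop := ∀ (grid : List (List Int)) (start : Int × Int) (color : Int), Dom_paint_region grid start color → Pre_paint_region grid start color → Spec_paint_region grid start color (paint_region grid start color)

-- ===== LEMMAS AND PROOFS =====

-- 4-neighbourhood adjacency
def pvAdj (c d : Int × Int) : Prop :=
  (c.1 = d.1 ∧ (c.2 = d.2 + 1 ∨ d.2 = c.2 + 1)) ∨
  (c.2 = d.2 ∧ (c.1 = d.1 + 1 ∨ d.1 = c.1 + 1))

-- proof context: the original grid, its shape, a nonzero colour and a 0 start cell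
structure pvCtx where
  G : List (List Int)
  C0 : Nat
  col : Int
  sx : Int
  sy : Int
  rect : ∀ row ∈ G, row.length = C0
  colNZ : col ≠ 0
  hx0 : 0 ≤ sx
  hxR : sx < (G.length : Int)
  hy0 : 0 ≤ sy
  hyC : sy < (C0 : Int)
  hz : pvCell G sx sy = 0

def pvCtx.R (K : pvCtx) : Int := (K.G.length : Int)
def pvCtx.C (K : pvCtx) : Int := (K.C0 : Int)
def pvCtx.InB (K : pvCtx) (c : Int × Int) : Prop :=
  0 ≤ c.1 ∧ c.1 < K.R ∧ 0 ≤ c.2 ∧ c.2 < K.C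
def pvCtx.Step (K : pvCtx) (c d : Int × Int) : Prop :=
  pvAdj c d ∧ K.InB d ∧ pvCell K.G d.1 d.2 = 0
def pvCtx.Reach (K : pvCtx) (c : Int × Int) : Prop :=
  Relation.ReflTransGen K.Step (K.sx, K.sy) c
noncomputable def pvCtx.box (K : pvCtx) : Finset (Int × Int) :=
  Finset.Icc 0 (K.R - 1) ×ˢ Finset.Icc 0 (K.C - 1)

-- grid g represents "G with the cells of P painted col"
def pvCtx.Rep (K : pvCtx) (g : List (List Int)) (P : Finset (Int × Int)) : Prop :=
  g.length = K.G.length ∧ (∀ row ∈ g, row.length = K.C0) ∧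
  (∀ a b : Int, 0 ≤ a → 0 ≤ b →
    pvCell g a b = if (a, b) ∈ P then K.col else pvCell K.G a b) ∧
  (∀ c ∈ P, K.Reach c)

theorem pvCell_nonneg_eq (g : List (List Int)) (a b : Int) (ha : 0 ≤ a) (hb : 0 ≤ b) :
    pvCell g a b = ((g.getD a.toNat []).getD b.toNat 0) := by
  unfold pvCell
  rw [PySem.List.pyGet?_of_nonneg g ha]
  cases hgl : g[a.toNat]? with
  | none =>
    have h0 : g.getD a.toNat [] = [] := by simp [List.getD_eq_getElem?_getD, hgl]
    simp [hgl, h0]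
  | some row =>
    have h0 : g.getD a.toNat [] = row := by simp [List.getD_eq_getElem?_getD, hgl]
    rw [h0]
    simp [PySem.List.pyGet?_of_nonneg row hb, List.getD_eq_getElem?_getD]

theorem pvSetCell_length (g : List (List Int)) (x y v : Int) :
    (pvSetCell g x y v).length = g.length := by
  unfold pvSetCell
  split
  · simp [PySem.List.length_pySetD]
  · rfl

theorem pvSetCell_eq_set (g : List (List Int)) (x y v : Int) (hx0 : 0 ≤ x)
    (hxR : x < (g.length : Int)) (hy0 : 0 ≤ y) :
    pvSetCell g x y v = g.set x.toNat ((g.getD x.toNat []).set y.toNat v) := by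
  have hlt : x.toNat < g.length := by omega
  have hgd : g.getD x.toNat [] = g[x.toNat] := by
    simp [List.getD_eq_getElem?_getD, List.getElem?_eq_getElem hlt]
  unfold pvSetCell
  rw [PySem.List.pyGet?_of_nonneg g hx0, List.getElem?_eq_getElem hlt]
  simp only [Option.isSome_some, if_true, Option.getD_some]
  rw [PySem.List.pySetD_of_nonneg _ _ hx0, PySem.List.pySetD_of_nonneg _ _ hy0, hgd]

theorem pvSetCell_rect (g : List (List Int)) (x y v : Int) (C0 : Nat) (hx0 : 0 ≤ x)
    (hxR : x < (g.length : Int)) (hy0 : 0 ≤ y)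
    (h : ∀ row ∈ g, row.length = C0) : ∀ row ∈ pvSetCell g x y v, row.length = C0 := by
  have hlt : x.toNat < g.length := by omega
  have hgd : g.getD x.toNat [] = g[x.toNat] := by
    simp [List.getD_eq_getElem?_getD, List.getElem?_eq_getElem hlt]
  rw [pvSetCell_eq_set g x y v hx0 hxR hy0]
  intro row hrow
  rcases List.mem_or_eq_of_mem_set hrow with hm | rfl
  · exact h row hm
  · rw [List.length_set, hgd]
    exact h _ (List.getElem_mem hlt)

theorem pvCell_pvSetCell (g : List (List Int)) (C0 : Nat) (hg : ∀ row ∈ g, row.length = C0)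
    (x y v a b : Int) (hx0 : 0 ≤ x) (hxR : x < (g.length : Int)) (hy0 : 0 ≤ y)
    (hyC : y < (C0 : Int)) (ha : 0 ≤ a) (hb : 0 ≤ b) :
    pvCell (pvSetCell g x y v) a b = if a = x ∧ b = y then v else pvCell g a b := by
  have hlt : x.toNat < g.length := by omega
  have hgd : g.getD x.toNat [] = g[x.toNat] := by
    simp [List.getD_eq_getElem?_getD, List.getElem?_eq_getElem hlt]
  have hrowlen : g[x.toNat].length = C0 := hg _ (List.getElem_mem hlt)
  have hylt : y.toNat < g[x.toNat].length := by omega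
  rw [pvSetCell_eq_set g x y v hx0 hxR hy0, hgd]
  rw [pvCell_nonneg_eq _ _ _ ha hb, pvCell_nonneg_eq _ _ _ ha hb]
  by_cases hax : a = x
  · subst hax
    have e1 : (g.set a.toNat (g[a.toNat].set y.toNat v)).getD a.toNat []
        = g[a.toNat].set y.toNat v := by
      simp [List.getD_eq_getElem?_getD, List.getElem?_set_self hlt]
    rw [e1]
    by_cases hby : b = y
    · subst hby
      rw [if_pos ⟨rfl, rfl⟩]
      simp [List.getD_eq_getElem?_getD, List.getElem?_set_self hylt,
        List.getElem?_eq_getElem hlt]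
    · have hbne : y.toNat ≠ b.toNat := by omega
      rw [if_neg (by tauto)]
      simp [List.getD_eq_getElem?_getD, List.getElem?_set_ne hbne,
        List.getElem?_eq_getElem hlt]
  · have hane : x.toNat ≠ a.toNat := by omega
    rw [if_neg (by tauto)]
    have e1 : (g.set x.toNat (g[x.toNat].set y.toNat v)).getD a.toNat []
        = g.getD a.toNat [] := by
      simp [List.getD_eq_getElem?_getD, List.getElem?_set_ne hane]
    rw [e1]

theorem pvReach_cell (K : pvCtx) (c : Int × Int) (h : K.Reach c) :
    K.InB c ∧ pvCell K.G c.1 c.2 = 0 := by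
  induction h with
  | refl => exact ⟨⟨K.hx0, K.hxR, K.hy0, K.hyC⟩, K.hz⟩
  | tail _ hstep _ => exact ⟨hstep.2.1, hstep.2.2⟩

theorem pvMem_box (K : pvCtx) (c : Int × Int) : c ∈ K.box ↔ K.InB c := by
  obtain ⟨a, b⟩ := c
  simp [pvCtx.box, Finset.mem_Icc, pvCtx.InB]
  omega

theorem pvBox_card (K : pvCtx) : K.box.card = K.G.length * K.C0 := by
  rw [pvCtx.box, Finset.card_product, Int.card_Icc, Int.card_Icc]
  have h1 : (K.R - 1 + 1 - 0).toNat = K.G.length := by rw [pvCtx.R]; omega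
  have h2 : (K.C - 1 + 1 - 0).toNat = K.C0 := by rw [pvCtx.C]; omega
  rw [h1, h2]

theorem pvReach_closed (K : pvCtx) (P : Finset (Int × Int)) (hs : (K.sx, K.sy) ∈ P)
    (hcl : ∀ p ∈ P, ∀ n, K.Step p n → n ∈ P) : ∀ c, K.Reach c → c ∈ P := by
  intro c h
  induction h with
  | refl => exact hs
  | tail _ hstep ih => exact hcl _ ih _ hstep

theorem pv_mem_ite_singleton {cond : Prop} [Decidable cond] {d n : Int × Int}
    (h : n ∈ (if cond then [d] else ([] : List (Int × Int)))) : cond ∧ n = d := by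
  split at h
  · simp at h; exact ⟨‹_›, h⟩
  · simp at h

theorem pvNeighbors_sound (K : pvCtx) (c : Int × Int) (hc : K.InB c) :
    ∀ n ∈ pvNeighbors c.1 c.2 K.R K.C, K.InB n ∧ pvAdj c n := by
  intro n hn
  obtain ⟨hcx0, hcxR, hcy0, hcyC⟩ := hc
  simp only [pvNeighbors, List.mem_append] at hn
  rcases hn with ((h | h) | h) | h <;> obtain ⟨hcond, rfl⟩ := pv_mem_ite_singleton h <;>
    refine ⟨⟨?_, ?_, ?_, ?_⟩, ?_⟩ <;> (try simp [pvAdj]) <;> (try omega)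

theorem pvNeighbors_complete (K : pvCtx) (c n : Int × Int) (h : K.Step c n) :
    n ∈ pvNeighbors c.1 c.2 K.R K.C := by
  obtain ⟨hadj, hinb, _⟩ := h
  obtain ⟨hn0, hnR, hn2, hnC⟩ := hinb
  simp only [pvNeighbors, List.mem_append]
  rcases hadj with ⟨he, hv | hv⟩ | ⟨he, hv | hv⟩
  · have hm : n = (c.1, c.2 - 1) := by rw [Prod.ext_iff]; constructor <;> omega
    have hg : (0:Int) < c.2 := by omega
    left; right
    simp [hm, hg]
  · have hm : n = (c.1, c.2 + 1) := by rw [Prod.ext_iff]; constructor <;> omega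
    have hg : c.2 + 1 < K.C := by omega
    right
    simp [hm, hg]
  · have hm : n = (c.1 - 1, c.2) := by rw [Prod.ext_iff]; constructor <;> omega
    have hg : (0:Int) < c.1 := by omega
    left; left; left
    simp [hm, hg]
  · have hm : n = (c.1 + 1, c.2) := by rw [Prod.ext_iff]; constructor <;> omega
    have hg : c.1 + 1 < K.R := by omega
    left; left; right
    simp [hm, hg]

-- characterisation of A's inner neighbour loop
theorem pvBfs_fold (K : pvCtx) (ns : List (Int × Int))
    (hns : ∀ n ∈ ns, K.InB n ∧ (pvCell K.G n.1 n.2 = 0 → K.Reach n)) :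
    ∀ g P painted q, K.Rep g P → painted = (P.card : Int) → (∀ c ∈ q, c ∈ P) →
    ∃ P' l, P ⊆ P' ∧
      K.Rep (ns.foldl (pvBfsStep K.col) (g, painted, q)).1 P' ∧
      (ns.foldl (pvBfsStep K.col) (g, painted, q)).2.1 = (P'.card : Int) ∧
      (ns.foldl (pvBfsStep K.col) (g, painted, q)).2.2 = q ++ l ∧
      l.length = P'.card - P.card ∧ (∀ c ∈ l, c ∈ P') ∧
      (∀ n ∈ ns, pvCell K.G n.1 n.2 = 0 → n ∈ P') ∧
      (∀ c ∈ P', c ∈ P ∨ c ∈ l) := by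
  induction ns with
  | nil =>
    intro g P painted q hrep hpc hq
    simp only [List.foldl_nil]
    exact ⟨P, [], Finset.Subset.refl _, hrep, hpc, by simp, by simp, by simp, by simp,
      fun c hc => Or.inl hc⟩
  | cons n ns ih =>
    intro g P painted q hrep hpc hq
    obtain ⟨hInB, hRe⟩ := hns n (List.mem_cons_self ..)
    have hns' : ∀ m ∈ ns, K.InB m ∧ (pvCell K.G m.1 m.2 = 0 → K.Reach m) :=
      fun m hm => hns m (List.mem_cons_of_mem _ hm)
    obtain ⟨hlen, hrect, hcells, hPreach⟩ := hrep
    have hn1 : 0 ≤ n.1 := hInB.1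
    have hn2 : 0 ≤ n.2 := hInB.2.2.1
    have hnR : n.1 < (g.length : Int) := by rw [hlen]; exact hInB.2.1
    have hnC : n.2 < (K.C0 : Int) := hInB.2.2.2
    have hcell := hcells n.1 n.2 hn1 hn2
    simp only [List.foldl_cons, pvBfsStep]
    by_cases h0 : pvCell g n.1 n.2 = 0
    · rw [if_pos h0]
      have hnP : n ∉ P := by
        intro hmem
        rw [h0] at hcell
        rw [if_pos (by simpa using hmem)] at hcell
        exact K.colNZ hcell.symm
      have horig : pvCell K.G n.1 n.2 = 0 := by
        rw [hcell, if_neg (by simpa using hnP)] at h0; exact h0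
      have hreachn : K.Reach n := hRe horig
      have hrep' : K.Rep (pvSetCell g n.1 n.2 K.col) (insert n P) := by
        refine ⟨?_, ?_, ?_, ?_⟩
        · rw [pvSetCell_length]; exact hlen
        · exact pvSetCell_rect g n.1 n.2 K.col K.C0 hn1 hnR hn2 hrect
        · intro a b ha hb
          rw [pvCell_pvSetCell g K.C0 hrect n.1 n.2 K.col a b hn1 hnR hn2 hnC ha hb]
          split_ifs with h1 h2 h2
          · rfl
          · exfalso; apply h2
            obtain ⟨rfl, rfl⟩ := h1
            exact Finset.mem_insert_self _ _
          · rw [hcells a b ha hb]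
            rcases Finset.mem_insert.mp h2 with heq | hmem
            · exfalso; apply h1
              constructor
              · exact congrArg Prod.fst heq
              · exact congrArg Prod.snd heq
            · rw [if_pos hmem]
          · rw [hcells a b ha hb]
            rw [if_neg (fun hmem => h2 (Finset.mem_insert_of_mem hmem))]
        · intro c hc
          rcases Finset.mem_insert.mp hc with rfl | hc
          · exact hreachn
          · exact hPreach c hc
      have hcard' : painted + 1 = ((insert n P).card : Int) := by
        rw [Finset.card_insert_of_notMem hnP]; rw [hpc]; push_cast; ring
      obtain ⟨P', l', hsub, hrepF, hcardF, hqF, hlenF, hlP, hnsF, hPl⟩ :=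
        ih hns' (pvSetCell g n.1 n.2 K.col) (insert n P) (painted + 1) (q ++ [n]) hrep' hcard'
          (by
            intro c hc
            rcases List.mem_append.mp hc with hc | hc
            · exact Finset.mem_insert_of_mem (hq c hc)
            · simp at hc; subst hc; exact Finset.mem_insert_self _ _)
      have hsub2 : P ⊆ P' := (Finset.subset_insert n P).trans hsub
      have hci : (insert n P).card = P.card + 1 := Finset.card_insert_of_notMem hnP
      have hle : (insert n P).card ≤ P'.card := Finset.card_le_card hsub
      refine ⟨P', n :: l', hsub2, hrepF, hcardF, ?_, ?_, ?_, ?_, ?_⟩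
      · rw [hqF, List.append_assoc]; rfl
      · simp only [List.length_cons, hlenF]; omega
      · intro c hc
        rcases List.mem_cons.mp hc with rfl | hc
        · exact hsub (Finset.mem_insert_self _ _)
        · exact hlP c hc
      · intro m hm h0m
        rcases List.mem_cons.mp hm with rfl | hm
        · exact hsub (Finset.mem_insert_self _ _)
        · exact hnsF m hm h0m
      · intro c hc
        rcases hPl c hc with hc2 | hc2
        · rcases Finset.mem_insert.mp hc2 with rfl | hc2
          · exact Or.inr (List.mem_cons_self ..)
          · exact Or.inl hc2
        · exact Or.inr (List.mem_cons_of_mem _ hc2)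
    · rw [if_neg h0]
      have hinP : pvCell K.G n.1 n.2 = 0 → n ∈ P := by
        intro horig
        by_contra hnP
        rw [hcell, if_neg (by simpa using hnP)] at h0
        exact h0 horig
      obtain ⟨P', l, hsub, hrepF, hcardF, hqF, hlenF, hlP, hnsF, hPl⟩ :=
        ih hns' g P painted q ⟨hlen, hrect, hcells, hPreach⟩ hpc hq
      refine ⟨P', l, hsub, hrepF, hcardF, hqF, hlenF, hlP, ?_, hPl⟩
      intro m hm h0m
      rcases List.mem_cons.mp hm with rfl | hm
      · exact hsub (hinP h0m)
      · exact hnsF m hm h0m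

-- A's loop returns the size of the reachable region
theorem pvBfs_loop (K : pvCtx) : ∀ fuel (g : List (List Int)) (q : List (Int × Int))
    (P : Finset (Int × Int)), K.Rep g P → (K.sx, K.sy) ∈ P → (∀ c ∈ q, c ∈ P) →
    (∀ p ∈ P, p ∈ q ∨ ∀ n, K.Step p n → n ∈ P) →
    2 * (K.box \ P).card + q.length ≤ fuel →
    ∃ Q : Finset (Int × Int),
      pvBfsLoop K.col K.R K.C fuel g q (P.card : Int) = (Q.card : Int) ∧
      ∀ c, c ∈ Q ↔ K.Reach c := by
  intro fuel
  induction fuel with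
  | zero =>
    intro g q P hrep hs hq hcl hfuel
    have hq0 : q = [] := List.eq_nil_of_length_eq_zero (by omega)
    subst hq0
    refine ⟨P, rfl, fun c => ⟨fun hc => hrep.2.2.2 c hc, ?_⟩⟩
    exact fun hre => pvReach_closed K P hs
      (fun p hp n hn => (hcl p hp).resolve_left (by simp) n hn) c hre
  | succ fuel ih =>
    intro g q P hrep hs hq hcl hfuel
    cases q with
    | nil =>
      refine ⟨P, by simp [pvBfsLoop], fun c => ⟨fun hc => hrep.2.2.2 c hc, ?_⟩⟩
      exact fun hre => pvReach_closed K P hs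
        (fun p hp n hn => (hcl p hp).resolve_left (by simp) n hn) c hre
    | cons c rest =>
      have hcP : c ∈ P := hq c (List.mem_cons_self ..)
      have hcReach : K.Reach c := hrep.2.2.2 c hcP
      have hcInB := (pvReach_cell K c hcReach).1
      have hns : ∀ n ∈ pvNeighbors c.1 c.2 K.R K.C,
          K.InB n ∧ (pvCell K.G n.1 n.2 = 0 → K.Reach n) := by
        intro n hn
        obtain ⟨hi, ha⟩ := pvNeighbors_sound K c hcInB n hn
        exact ⟨hi, fun h0 => hcReach.tail ⟨ha, hi, h0⟩⟩
      obtain ⟨P', l, hsub, hrepF, hcardF, hqF, hlenF, hlP, hnsF, hPl⟩ :=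
        pvBfs_fold K _ hns g P (P.card : Int) rest hrep rfl
          (fun x hx => hq x (List.mem_cons_of_mem _ hx))
      have hstep : pvBfsLoop K.col K.R K.C (fuel + 1) g (c :: rest) (P.card : Int)
          = pvBfsLoop K.col K.R K.C fuel
            ((pvNeighbors c.1 c.2 K.R K.C).foldl (pvBfsStep K.col) (g, (P.card : Int), rest)).1
            ((pvNeighbors c.1 c.2 K.R K.C).foldl (pvBfsStep K.col) (g, (P.card : Int), rest)).2.2
            ((pvNeighbors c.1 c.2 K.R K.C).foldl (pvBfsStep K.col) (g, (P.card : Int), rest)).2.1 := by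
        simp only [pvBfsLoop]
      rw [hstep, hcardF, hqF]
      apply ih _ _ P' hrepF (hsub hs)
      · intro x hx
        rcases List.mem_append.mp hx with hx | hx
        · exact hsub (hq x (List.mem_cons_of_mem _ hx))
        · exact hlP x hx
      · intro p hp
        rcases hPl p hp with hpP | hpl
        · rcases hcl p hpP with hpq | hclosed
          · rcases List.mem_cons.mp hpq with rfl | hrest
            · exact Or.inr (fun n hn => hnsF n (pvNeighbors_complete K p n hn) hn.2.2)
            · exact Or.inl (List.mem_append_left _ hrest)
          · exact Or.inr (fun n hn => hsub (hclosed n hn))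
        · exact Or.inl (List.mem_append_right _ hpl)
      · have hPbox : P ⊆ K.box := fun x hx =>
          (pvMem_box K x).mpr (pvReach_cell K x (hrep.2.2.2 x hx)).1
        have hP'box : P' ⊆ K.box := fun x hx =>
          (pvMem_box K x).mpr (pvReach_cell K x (hrepF.2.2.2 x hx)).1
        have h1 : (K.box \ P).card = K.box.card - P.card := by
          rw [Finset.card_sdiff, Finset.inter_eq_left.mpr hPbox]
        have h2 : (K.box \ P').card = K.box.card - P'.card := by
          rw [Finset.card_sdiff, Finset.inter_eq_left.mpr hP'box]
        have h3 : P.card ≤ P'.card := Finset.card_le_card hsub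
        have h4 : P'.card ≤ K.box.card := Finset.card_le_card hP'box
        have h5 : P.card ≤ K.box.card := Finset.card_le_card hPbox
        simp only [List.length_cons] at hfuel
        simp only [List.length_append, hlenF]
        omega

theorem pvScanL_spec (g : List (List Int)) (sx : Int) : ∀ lo : Int, 0 ≤ lo →
    pvCell g sx lo = 0 →
    0 ≤ pvScanL g sx lo ∧ pvScanL g sx lo ≤ lo ∧
    (∀ j : Int, pvScanL g sx lo ≤ j → j ≤ lo → pvCell g sx j = 0) ∧
    (0 < pvScanL g sx lo → pvCell g sx (pvScanL g sx lo - 1) ≠ 0) := by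
  have main : ∀ n : ℕ, ∀ lo : Int, lo.toNat ≤ n → 0 ≤ lo → pvCell g sx lo = 0 →
      0 ≤ pvScanL g sx lo ∧ pvScanL g sx lo ≤ lo ∧
      (∀ j : Int, pvScanL g sx lo ≤ j → j ≤ lo → pvCell g sx j = 0) ∧
      (0 < pvScanL g sx lo → pvCell g sx (pvScanL g sx lo - 1) ≠ 0) := by
    intro n
    induction n with
    | zero =>
      intro lo hn h0 hc
      have hlo : lo = 0 := by omega
      subst hlo
      rw [pvScanL.eq_def]
      rw [dif_neg (by simp)]
      refine ⟨le_refl _, le_refl _, ?_, ?_⟩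
      · intro j h1 h2
        have : j = 0 := le_antisymm h2 h1
        subst this; exact hc
      · intro h; omega
    | succ n ih =>
      intro lo hn h0 hc
      rw [pvScanL.eq_def]
      split_ifs with h
      · obtain ⟨hpos, hz⟩ := h
        obtain ⟨r0, r1, r2, r3⟩ := ih (lo - 1) (by omega) (by omega) hz
        refine ⟨r0, by omega, ?_, r3⟩
        intro j hj1 hj2
        by_cases hjlo : j ≤ lo - 1
        · exact r2 j hj1 hjlo
        · have : j = lo := by omega
          subst this; exact hc
      · refine ⟨h0, le_refl _, ?_, ?_⟩
        · intro j hj1 hj2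
          have : j = lo := le_antisymm hj2 hj1
          subst this; exact hc
        · intro hpos hcell; exact h ⟨hpos, hcell⟩
  exact fun lo h0 hc => main lo.toNat lo (le_refl _) h0 hc

theorem pvScanR_spec (g : List (List Int)) (sx n_cols : Int) : ∀ hi : Int, hi < n_cols →
    pvCell g sx hi = 0 →
    hi ≤ pvScanR g sx hi n_cols ∧ pvScanR g sx hi n_cols < n_cols ∧
    (∀ j : Int, hi ≤ j → j ≤ pvScanR g sx hi n_cols → pvCell g sx j = 0) ∧
    (pvScanR g sx hi n_cols + 1 < n_cols → pvCell g sx (pvScanR g sx hi n_cols + 1) ≠ 0) := by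
  have main : ∀ n : ℕ, ∀ hi : Int, (n_cols - hi).toNat ≤ n → hi < n_cols → pvCell g sx hi = 0 →
      hi ≤ pvScanR g sx hi n_cols ∧ pvScanR g sx hi n_cols < n_cols ∧
      (∀ j : Int, hi ≤ j → j ≤ pvScanR g sx hi n_cols → pvCell g sx j = 0) ∧
      (pvScanR g sx hi n_cols + 1 < n_cols → pvCell g sx (pvScanR g sx hi n_cols + 1) ≠ 0) := by
    intro n
    induction n with
    | zero =>
      intro hi hn hlt hc
      omega
    | succ n ih =>
      intro hi hn hlt hc
      rw [pvScanR.eq_def]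
      split_ifs with h
      · obtain ⟨hpos, hz⟩ := h
        obtain ⟨r0, r1, r2, r3⟩ := ih (hi + 1) (by omega) (by omega) hz
        refine ⟨by omega, r1, ?_, r3⟩
        intro j hj1 hj2
        by_cases hjhi : hi + 1 ≤ j
        · exact r2 j hjhi hj2
        · have : j = hi := by omega
          subst this; exact hc
      · refine ⟨le_refl _, hlt, ?_, ?_⟩
        · intro j hj1 hj2
          have : j = hi := le_antisymm hj2 hj1
          subst this; exact hc
        · intro hpos hcell; exact h ⟨hpos, hcell⟩
  exact fun hi hlt hc => main (n_cols - hi).toNat hi (le_refl _) hlt hc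

theorem pvPaintRow_spec (col : Int) (C0 : Nat) (sx hi : Int) (hhiC : hi < (C0 : Int)) :
    ∀ n : ℕ, ∀ lo : Int, (hi + 1 - lo).toNat = n → 0 ≤ lo → lo ≤ hi + 1 →
    ∀ (g : List (List Int)) (painted : Int), (∀ row ∈ g, row.length = C0) →
    0 ≤ sx → sx < (g.length : Int) →
    (pvPaintRow col sx (PySem.List.pyRange lo (hi + 1) 1) (g, painted)).2
        = painted + (hi + 1 - lo) ∧
    (pvPaintRow col sx (PySem.List.pyRange lo (hi + 1) 1) (g, painted)).1.length = g.length ∧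
    (∀ row ∈ (pvPaintRow col sx (PySem.List.pyRange lo (hi + 1) 1) (g, painted)).1,
        row.length = C0) ∧
    (∀ a b : Int, 0 ≤ a → 0 ≤ b →
      pvCell (pvPaintRow col sx (PySem.List.pyRange lo (hi + 1) 1) (g, painted)).1 a b
        = if a = sx ∧ lo ≤ b ∧ b ≤ hi then col else pvCell g a b) := by
  intro n
  induction n with
  | zero =>
    intro lo hn h0 hle g painted hrect hs0 hsR
    have hlo : lo = hi + 1 := by omega
    subst hlo
    rw [PySem.List.pyRange_one_eq_nil (le_refl _)]
    have e1 : (pvPaintRow col sx [] (g, painted)).1 = g := rfl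
    have e2 : (pvPaintRow col sx [] (g, painted)).2 = painted := rfl
    rw [e2, e1]
    refine ⟨by omega, rfl, hrect, ?_⟩
    intro a b ha hb
    rw [if_neg (by omega)]
  | succ n ih =>
    intro lo hn h0 hle g painted hrect hs0 hsR
    have hlt : lo < hi + 1 := by omega
    rw [PySem.List.pyRange_one_cons hlt]
    have hstep : pvPaintRow col sx (lo :: PySem.List.pyRange (lo + 1) (hi + 1) 1) (g, painted)
        = pvPaintRow col sx (PySem.List.pyRange (lo + 1) (hi + 1) 1)
            (pvSetCell g sx lo col, painted + 1) := rfl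
    rw [hstep]
    have hrect1 : ∀ row ∈ pvSetCell g sx lo col, row.length = C0 :=
      pvSetCell_rect g sx lo col C0 hs0 hsR h0 hrect
    have hlen1 : (pvSetCell g sx lo col).length = g.length := pvSetCell_length g sx lo col
    have hcell1 : ∀ a b : Int, 0 ≤ a → 0 ≤ b →
        pvCell (pvSetCell g sx lo col) a b = if a = sx ∧ b = lo then col else pvCell g a b :=
      fun a b ha hb => pvCell_pvSetCell g C0 hrect sx lo col a b hs0 hsR h0 (by omega) ha hb
    obtain ⟨hP2, hL2, hR2, hC2⟩ := ih (lo + 1) (by omega) (by omega) (by omega)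
      (pvSetCell g sx lo col) (painted + 1) hrect1 hs0 (by rw [hlen1]; exact hsR)
    refine ⟨?_, ?_, hR2, ?_⟩
    · rw [hP2]; omega
    · rw [hL2, hlen1]
    · intro a b ha hb
      rw [hC2 a b ha hb]
      by_cases h1 : a = sx ∧ lo + 1 ≤ b ∧ b ≤ hi
      · rw [if_pos h1, if_pos (by omega)]
      · rw [if_neg h1, hcell1 a b ha hb]
        by_cases h2 : a = sx ∧ b = lo
        · rw [if_pos h2, if_pos (by omega)]
        · rw [if_neg h2]
          by_cases h3 : a = sx ∧ lo ≤ b ∧ b ≤ hi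
          · exfalso; omega
          · rw [if_neg h3]

theorem pvSeedsOne (g : List (List Int)) (n_rows lo hi : Int) (stk : List (Int × Int))
    (nx : Int) :
    ∃ m, (if 0 ≤ nx ∧ nx < n_rows then
            (PySem.List.pyRange lo (hi + 1) 1).foldl
              (fun s cy => if pvCell g nx cy = 0 then s ++ [(nx, cy)] else s) stk
          else stk) = stk ++ m ∧
      m.length ≤ (hi + 1 - lo).toNat ∧
      (∀ c ∈ m, c.1 = nx ∧ 0 ≤ nx ∧ nx < n_rows ∧ lo ≤ c.2 ∧ c.2 ≤ hi ∧
        pvCell g c.1 c.2 = 0) ∧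
      (∀ cy : Int, 0 ≤ nx → nx < n_rows → lo ≤ cy → cy ≤ hi → pvCell g nx cy = 0 →
        (nx, cy) ∈ stk ++ m) := by
  have hrow : ∀ (cys : List Int) (acc : List (Int × Int)),
      cys.foldl (fun s cy => if pvCell g nx cy = 0 then s ++ [(nx, cy)] else s) acc
        = acc ++ (cys.filter (fun cy => decide (pvCell g nx cy = 0))).map (fun cy => (nx, cy)) := by
    intro cys
    induction cys with
    | nil => intro acc; simp
    | cons cy cys ih =>
      intro acc
      by_cases h : pvCell g nx cy = 0
      · rw [List.foldl_cons, if_pos h, ih, List.filter_cons, if_pos (by simp [h])]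
        simp [List.append_assoc]
      · rw [List.foldl_cons, if_neg h, ih, List.filter_cons, if_neg (by simp [h])]
  by_cases hg : 0 ≤ nx ∧ nx < n_rows
  · refine ⟨(((PySem.List.pyRange lo (hi + 1) 1).filter
        (fun cy => decide (pvCell g nx cy = 0))).map (fun cy => (nx, cy))), ?_, ?_, ?_, ?_⟩
    · rw [if_pos hg, hrow]
    · rw [List.length_map]
      exact le_of_le_of_eq (List.length_filter_le _ _)
        (PySem.List.length_pyRange_one lo (hi + 1))
    · intro c hc
      simp only [List.mem_map, List.mem_filter, PySem.List.mem_pyRange_one,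
        decide_eq_true_eq] at hc
      obtain ⟨cy, ⟨⟨hcy1, hcy2⟩, hcz⟩, rfl⟩ := hc
      exact ⟨rfl, hg.1, hg.2, hcy1, by omega, hcz⟩
    · intro cy _ _ hcy1 hcy2 hcz
      refine List.mem_append_right _ ?_
      simp only [List.mem_map, List.mem_filter, PySem.List.mem_pyRange_one, decide_eq_true_eq]
      exact ⟨cy, ⟨⟨hcy1, by omega⟩, hcz⟩, rfl⟩
  · refine ⟨[], by rw [if_neg hg]; simp, by simp, by simp, ?_⟩
    intro cy h1 h2 _ _ _
    exact absurd ⟨h1, h2⟩ hg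

theorem pvSeeds_spec (g : List (List Int)) (n_rows lo hi : Int) (stk : List (Int × Int))
    (sx : Int) :
    ∃ l, pvSeeds g n_rows lo hi stk sx = stk ++ l ∧
      l.length ≤ 2 * (hi + 1 - lo).toNat ∧
      (∀ c ∈ l, (c.1 = sx - 1 ∨ c.1 = sx + 1) ∧ 0 ≤ c.1 ∧ c.1 < n_rows ∧
        lo ≤ c.2 ∧ c.2 ≤ hi ∧ pvCell g c.1 c.2 = 0) ∧
      (∀ nx cy : Int, (nx = sx - 1 ∨ nx = sx + 1) → 0 ≤ nx → nx < n_rows →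
        lo ≤ cy → cy ≤ hi → pvCell g nx cy = 0 →
        (nx, cy) ∈ pvSeeds g n_rows lo hi stk sx) := by
  obtain ⟨m1, he1, hl1, hm1, hc1⟩ := pvSeedsOne g n_rows lo hi stk (sx - 1)
  obtain ⟨m2, he2, hl2, hm2, hc2⟩ := pvSeedsOne g n_rows lo hi (stk ++ m1) (sx + 1)
  have heq : pvSeeds g n_rows lo hi stk sx = (stk ++ m1) ++ m2 := by
    unfold pvSeeds
    simp only [List.foldl_cons, List.foldl_nil]
    rw [he1, he2]
  refine ⟨m1 ++ m2, by rw [heq, List.append_assoc], ?_, ?_, ?_⟩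
  · rw [List.length_append]; omega
  · intro c hc
    rcases List.mem_append.mp hc with hc | hc
    · obtain ⟨h1, h2, h3, h4, h5, h6⟩ := hm1 c hc
      exact ⟨Or.inl h1, by omega, by omega, h4, h5, h6⟩
    · obtain ⟨h1, h2, h3, h4, h5, h6⟩ := hm2 c hc
      exact ⟨Or.inr h1, by omega, by omega, h4, h5, h6⟩
  · intro nx cy hside h1 h2 h3 h4 h5
    rw [heq]
    rcases hside with rfl | rfl
    · exact List.mem_append_left _ (hc1 cy h1 h2 h3 h4 h5)
    · exact hc2 cy h1 h2 h3 h4 h5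

theorem pvSpan_reach (K : pvCtx) (g : List (List Int)) (P : Finset (Int × Int))
    (hrep : K.Rep g P) (sx' sy' lo hi : Int) (hr : K.Reach (sx', sy'))
    (hlo : 0 ≤ lo) (hhi : hi < K.C) (hlos : lo ≤ sy') (hshi : sy' ≤ hi)
    (hzero : ∀ j : Int, lo ≤ j → j ≤ hi → pvCell g sx' j = 0) :
    ∀ j : Int, lo ≤ j → j ≤ hi → K.Reach (sx', j) := by
  obtain ⟨hInB, _⟩ := pvReach_cell K _ hr
  have horig : ∀ j : Int, lo ≤ j → j ≤ hi → pvCell K.G sx' j = 0 := by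
    intro j h1 h2
    have hc := hrep.2.2.1 sx' j hInB.1 (by omega)
    rw [hzero j h1 h2] at hc
    by_cases hmem : (sx', j) ∈ P
    · rw [if_pos hmem] at hc; exact absurd hc.symm K.colNZ
    · rw [if_neg hmem] at hc; exact hc.symm
  have down : ∀ d : ℕ, ∀ j : Int, j = sy' - d → lo ≤ j → K.Reach (sx', j) := by
    intro d
    induction d with
    | zero =>
      intro j hj _
      have : j = sy' := by omega
      subst this; exact hr
    | succ d ih =>
      intro j hj hlo2
      have hre : K.Reach (sx', j + 1) := ih (j + 1) (by push_cast at hj ⊢; omega) (by omega)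
      refine hre.tail ⟨Or.inl ⟨rfl, Or.inl rfl⟩, ⟨hInB.1, hInB.2.1, by omega, by omega⟩, ?_⟩
      exact horig j hlo2 (by omega)
  have up : ∀ d : ℕ, ∀ j : Int, j = sy' + d → j ≤ hi → K.Reach (sx', j) := by
    intro d
    induction d with
    | zero =>
      intro j hj _
      have : j = sy' := by omega
      subst this; exact hr
    | succ d ih =>
      intro j hj hhi2
      have hre : K.Reach (sx', j - 1) := ih (j - 1) (by push_cast at hj ⊢; omega) (by omega)
      refine hre.tail ⟨Or.inl ⟨rfl, Or.inr (by omega)⟩, ⟨hInB.1, hInB.2.1, by omega, by omega⟩, ?_⟩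
      exact horig j (by omega) hhi2
  intro j h1 h2
  by_cases h : j ≤ sy'
  · exact down (sy' - j).toNat j (by omega) h1
  · exact up (j - sy').toNat j (by omega) h2

set_option maxHeartbeats 1000000 in
theorem pvScan_loop (K : pvCtx) : ∀ fuel (g : List (List Int)) (stk : List (Int × Int))
    (P : Finset (Int × Int)), K.Rep g P →
    ((K.sx, K.sy) ∈ P ∨ (K.sx, K.sy) ∈ stk) →
    (∀ s ∈ stk, K.Reach s) →
    (∀ p ∈ P, ∀ n, K.Step p n → n ∈ P ∨ n ∈ stk) →
    (2 * K.C0 + 2) * (K.box \ P).card + stk.length ≤ fuel →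
    ∃ Q : Finset (Int × Int),
      pvScanLoop K.col K.R K.C fuel g stk (P.card : Int) = (Q.card : Int) ∧
      ∀ c, c ∈ Q ↔ K.Reach c := by
  intro fuel
  induction fuel with
  | zero =>
    intro g stk P hrep hstart hstk hcl hfuel
    have hstk0 : stk = [] := List.eq_nil_of_length_eq_zero (by omega)
    subst hstk0
    have hs : (K.sx, K.sy) ∈ P := hstart.resolve_right (by simp)
    exact ⟨P, rfl, fun c => ⟨fun hc => hrep.2.2.2 c hc,
      fun hre => pvReach_closed K P hs
        (fun p hp n hn => (hcl p hp n hn).resolve_right (by simp)) c hre⟩⟩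
  | succ fuel ih =>
    intro g stk P hrep hstart hstk hcl hfuel
    cases hlast : stk.getLast? with
    | none =>
      have hstk0 : stk = [] := List.getLast?_eq_none_iff.mp hlast
      subst hstk0
      have hs : (K.sx, K.sy) ∈ P := hstart.resolve_right (by simp)
      refine ⟨P, by simp only [pvScanLoop, List.getLast?_nil], fun c => ⟨fun hc => hrep.2.2.2 c hc,
        fun hre => pvReach_closed K P hs
          (fun p hp n hn => (hcl p hp n hn).resolve_right (by simp)) c hre⟩⟩
    | some s =>
      have hsplit : stk = stk.dropLast ++ [s] := (List.dropLast_append_getLast? s hlast).symm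
      have hmem : ∀ c, c ∈ stk ↔ c ∈ stk.dropLast ∨ c = s := by
        intro c
        constructor
        · intro hcs
          rw [hsplit] at hcs
          rcases List.mem_append.mp hcs with h | h
          · exact Or.inl h
          · simp at h; exact Or.inr h
        · intro hcs
          rw [hsplit]
          rcases hcs with h | rfl
          · exact List.mem_append_left _ h
          · exact List.mem_append_right _ (by simp)
      have hlen_stk : stk.length = stk.dropLast.length + 1 := by
        conv_lhs => rw [hsplit]
        simp
      have hsReach : K.Reach s := hstk s ((hmem s).mpr (Or.inr rfl))
      obtain ⟨hsInB, hsOrig⟩ := pvReach_cell K s hsReach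
      obtain ⟨hsx1, hsx2, hsy1, hsy2⟩ := hsInB
      obtain ⟨hlen, hrect, hcells, hPreach⟩ := hrep
      by_cases h0 : pvCell g s.1 s.2 = 0
      · -- seed cell still 0: paint the whole horizontal run, seed rows above/below
        obtain ⟨hlo0, hlos, hzL, hbL⟩ := pvScanL_spec g s.1 s.2 hsy1 h0
        obtain ⟨hshi, hhiC, hzR, hbR⟩ := pvScanR_spec g s.1 K.C s.2 hsy2 h0
        have hval : pvScanLoop K.col K.R K.C (fuel + 1) g stk (P.card : Int)
            = pvScanLoop K.col K.R K.C fuel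
                (pvPaintRow K.col s.1
                  (PySem.List.pyRange (pvScanL g s.1 s.2) (pvScanR g s.1 s.2 K.C + 1) 1)
                  (g, (P.card : Int))).1
                (pvSeeds
                  (pvPaintRow K.col s.1
                    (PySem.List.pyRange (pvScanL g s.1 s.2) (pvScanR g s.1 s.2 K.C + 1) 1)
                    (g, (P.card : Int))).1
                  K.R (pvScanL g s.1 s.2) (pvScanR g s.1 s.2 K.C) stk.dropLast s.1)
                (pvPaintRow K.col s.1
                  (PySem.List.pyRange (pvScanL g s.1 s.2) (pvScanR g s.1 s.2 K.C + 1) 1)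
                  (g, (P.card : Int))).2 := by
          simp only [pvScanLoop, hlast]
          rw [if_neg (by simp [h0])]
        set lo := pvScanL g s.1 s.2 with hlodef
        set hi := pvScanR g s.1 s.2 K.C with hhidef
        set rest := stk.dropLast with hrestdef
        have hzRow : ∀ j : Int, lo ≤ j → j ≤ hi → pvCell g s.1 j = 0 := by
          intro j h1 h2
          by_cases hj : j ≤ s.2
          · exact hzL j h1 hj
          · exact hzR j (by omega) h2
        have horig : ∀ j : Int, lo ≤ j → j ≤ hi →
            pvCell K.G s.1 j = 0 ∧ (s.1, j) ∉ P := by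
          intro j h1 h2
          have hcj := hcells s.1 j hsx1 (by omega)
          rw [hzRow j h1 h2] at hcj
          by_cases hmemP : (s.1, j) ∈ P
          · rw [if_pos hmemP] at hcj
            exact absurd hcj.symm K.colNZ
          · rw [if_neg hmemP] at hcj
            exact ⟨hcj.symm, hmemP⟩
        have hspanReach : ∀ j : Int, lo ≤ j → j ≤ hi → K.Reach (s.1, j) :=
          pvSpan_reach K g P ⟨hlen, hrect, hcells, hPreach⟩ s.1 s.2 lo hi
            (by simpa using hsReach) hlo0 hhiC hlos hshi hzRow
        set span : Finset (Int × Int) := (Finset.Icc lo hi).image (fun j => (s.1, j))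
          with hspandef
        have hmemspan : ∀ c : Int × Int, c ∈ span ↔ c.1 = s.1 ∧ lo ≤ c.2 ∧ c.2 ≤ hi := by
          intro c
          rw [hspandef]
          simp only [Finset.mem_image, Finset.mem_Icc]
          constructor
          · rintro ⟨j, hj, rfl⟩
            exact ⟨rfl, hj.1, hj.2⟩
          · rintro ⟨h1, h2, h3⟩
            exact ⟨c.2, ⟨h2, h3⟩, by rw [Prod.ext_iff]; exact ⟨h1.symm, rfl⟩⟩
        have hcardspan : span.card = (hi + 1 - lo).toNat := by
          rw [hspandef, Finset.card_image_of_injective _ (fun a b h => by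
            simpa using congrArg Prod.snd h), Int.card_Icc]
        have hdisj : ∀ c ∈ span, c ∉ P := by
          intro c hc
          rw [hmemspan] at hc
          intro hcP
          have he : c = (s.1, c.2) := by rw [Prod.ext_iff]; exact ⟨hc.1, rfl⟩
          rw [he] at hcP
          exact (horig c.2 hc.2.1 hc.2.2).2 hcP
        set P' := P ∪ span with hP'def
        have hPdisj : Disjoint P span := Finset.disjoint_left.mpr (fun a ha hb => hdisj a hb ha)
        have hcardP' : P'.card = P.card + span.card := Finset.card_union_of_disjoint hPdisj
        obtain ⟨hPmt, hLen', hRect', hCells'⟩ :=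
          pvPaintRow_spec K.col K.C0 s.1 hi hhiC (hi + 1 - lo).toNat lo rfl hlo0 (by omega)
            g (P.card : Int) hrect hsx1 (by rw [hlen]; exact hsx2)
        have hrep' : K.Rep (pvPaintRow K.col s.1 (PySem.List.pyRange lo (hi + 1) 1)
            (g, (P.card : Int))).1 P' := by
          refine ⟨by rw [hLen', hlen], hRect', ?_, ?_⟩
          · intro a b ha hb
            rw [hCells' a b ha hb]
            by_cases hab : a = s.1 ∧ lo ≤ b ∧ b ≤ hi
            · rw [if_pos hab, if_pos (Finset.mem_union_right _ ((hmemspan (a, b)).mpr hab))]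
            · rw [if_neg hab, hcells a b ha hb]
              by_cases hP : (a, b) ∈ P
              · rw [if_pos hP, if_pos (Finset.mem_union_left _ hP)]
              · rw [if_neg hP, if_neg (by
                  intro hP'
                  rcases Finset.mem_union.mp hP' with h | h
                  · exact hP h
                  · exact hab ((hmemspan (a, b)).mp h))]
          · intro c hc
            rcases Finset.mem_union.mp hc with h | h
            · exact hPreach c h
            · rw [hmemspan] at h
              have he : c = (s.1, c.2) := by rw [Prod.ext_iff]; exact ⟨h.1, rfl⟩
              rw [he]
              exact hspanReach c.2 h.2.1 h.2.2
        obtain ⟨hlen'', hrect'', hcells'', hreach''⟩ := hrep'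
        have hcardInt : (pvPaintRow K.col s.1 (PySem.List.pyRange lo (hi + 1) 1)
            (g, (P.card : Int))).2 = (P'.card : Int) := by
          rw [hPmt, hcardP', hcardspan]
          have : (((hi + 1 - lo).toNat : Nat) : Int) = hi + 1 - lo := by omega
          push_cast
          omega
        obtain ⟨l, hseedeq, hseedlen, hseedmem, hseedcomp⟩ :=
          pvSeeds_spec (pvPaintRow K.col s.1 (PySem.List.pyRange lo (hi + 1) 1)
            (g, (P.card : Int))).1 K.R lo hi rest s.1
        rw [hval, hcardInt, hseedeq]
        apply ih (pvPaintRow K.col s.1 (PySem.List.pyRange lo (hi + 1) 1)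
          (g, (P.card : Int))).1 (rest ++ l) P' ⟨hlen'', hrect'', hcells'', hreach''⟩
        · -- start
          rcases hstart with h | h
          · exact Or.inl (Finset.mem_union_left _ h)
          · rcases (hmem _).mp h with h2 | h2
            · exact Or.inr (List.mem_append_left _ h2)
            · refine Or.inl (Finset.mem_union_right _ ((hmemspan _).mpr ?_))
              rw [h2]
              exact ⟨rfl, hlos, hshi⟩
        · -- every stack entry reachable
          intro c hc
          rcases List.mem_append.mp hc with h | h
          · exact hstk c ((hmem c).mpr (Or.inl h))
          · obtain ⟨hside, hc0, hcR, hclo, hchi, hcz⟩ := hseedmem c h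
            have hc20 : (0:Int) ≤ c.2 := by omega
            have hcnotP' : (c.1, c.2) ∉ P' ∧ pvCell K.G c.1 c.2 = 0 := by
              have := hcells'' c.1 c.2 hc0 hc20
              rw [show pvCell (pvPaintRow K.col s.1 (PySem.List.pyRange lo (hi + 1) 1)
                (g, (P.card : Int))).1 c.1 c.2 = 0 from hcz] at this
              by_cases hmm : (c.1, c.2) ∈ P'
              · rw [if_pos hmm] at this
                exact absurd this.symm K.colNZ
              · rw [if_neg hmm] at this
                exact ⟨hmm, this.symm⟩
            have hreachspan : K.Reach (s.1, c.2) := hspanReach c.2 hclo hchi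
            exact hreachspan.tail
              ⟨Or.inr ⟨rfl, by omega⟩, ⟨hc0, hcR, hc20, by omega⟩, hcnotP'.2⟩
        · -- closure
          intro p hp n hn
          rcases Finset.mem_union.mp hp with hpP | hpspan
          · rcases hcl p hpP n hn with h | h
            · exact Or.inl (Finset.mem_union_left _ h)
            · rcases (hmem n).mp h with h2 | h2
              · exact Or.inr (List.mem_append_left _ h2)
              · refine Or.inl (Finset.mem_union_right _ ((hmemspan n).mpr ?_))
                rw [h2]
                exact ⟨rfl, hlos, hshi⟩
          · rw [hmemspan] at hpspan
            obtain ⟨hps, hplo, hphi⟩ := hpspan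
            obtain ⟨hadj, hninb, hnorig⟩ := hn
            obtain ⟨hn0, hnR, hn20, hnC⟩ := hninb
            have hnmemP : pvCell g n.1 n.2 ≠ 0 → n ∈ P := by
              intro hgz
              by_contra hnP
              have hcn := hcells n.1 n.2 hn0 hn20
              rw [if_neg (by simpa using hnP), hnorig] at hcn
              exact hgz hcn
            rcases hadj with ⟨he, hv | hv⟩ | ⟨he, hv | hv⟩
            · -- n to the left of p
              by_cases hge : lo ≤ n.2
              · exact Or.inl (Finset.mem_union_right _
                  ((hmemspan n).mpr ⟨by omega, hge, by omega⟩))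
              · refine Or.inl (Finset.mem_union_left _ (hnmemP ?_))
                have hb := hbL (by omega)
                rw [show s.1 = n.1 from by omega, show lo - 1 = n.2 from by omega] at hb
                exact hb
            · -- n to the right of p
              by_cases hge : n.2 ≤ hi
              · exact Or.inl (Finset.mem_union_right _
                  ((hmemspan n).mpr ⟨by omega, by omega, hge⟩))
              · refine Or.inl (Finset.mem_union_left _ (hnmemP ?_))
                have hb := hbR (by omega)
                rw [show s.1 = n.1 from by omega, show hi + 1 = n.2 from by omega] at hb
                exact hb
            · -- n above p
              by_cases hzg : pvCell (pvPaintRow K.col s.1 (PySem.List.pyRange lo (hi + 1) 1)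
                  (g, (P.card : Int))).1 n.1 n.2 = 0
              · refine Or.inr ?_
                have hh := hseedcomp n.1 n.2 (by omega) hn0 hnR (by omega) (by omega) hzg
                rw [hseedeq] at hh
                simpa using hh
              · refine Or.inl ?_
                by_contra hnP'
                have hcn := hcells'' n.1 n.2 hn0 hn20
                rw [if_neg (by simpa using hnP'), hnorig] at hcn
                exact hzg hcn
            · -- n below p
              by_cases hzg : pvCell (pvPaintRow K.col s.1 (PySem.List.pyRange lo (hi + 1) 1)
                  (g, (P.card : Int))).1 n.1 n.2 = 0
              · refine Or.inr ?_
                have hh := hseedcomp n.1 n.2 (by omega) hn0 hnR (by omega) (by omega) hzg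
                rw [hseedeq] at hh
                simpa using hh
              · refine Or.inl ?_
                by_contra hnP'
                have hcn := hcells'' n.1 n.2 hn0 hn20
                rw [if_neg (by simpa using hnP'), hnorig] at hcn
                exact hzg hcn
        · -- fuel
          rw [List.length_append]
          have hspanbox : span ⊆ K.box := by
            intro c hc
            rw [hmemspan] at hc
            exact (pvMem_box K c).mpr ⟨by omega, by omega, by omega, by omega⟩
          have hsub2 : span ⊆ K.box \ P :=
            fun c hc => Finset.mem_sdiff.mpr ⟨hspanbox hc, hdisj c hc⟩
          have hsdiff : K.box \ P' = (K.box \ P) \ span := by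
            rw [hP'def]
            ext c
            simp only [Finset.mem_sdiff, Finset.mem_union]
            tauto
          have hcard2 : (K.box \ P').card = (K.box \ P).card - span.card := by
            rw [hsdiff, Finset.card_sdiff, Finset.inter_eq_left.mpr hsub2]
          have hkle : span.card ≤ (K.box \ P).card := Finset.card_le_card hsub2
          have hdist : (2 * K.C0 + 2) * ((K.box \ P).card)
              = (2 * K.C0 + 2) * ((K.box \ P').card) + (2 * K.C0 + 2) * span.card := by
            rw [hcard2, ← Nat.mul_add]
            congr 1
            omega
          have h2k : 2 * span.card ≤ (2 * K.C0 + 2) * span.card :=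
            Nat.mul_le_mul_right _ (by omega)
          have hlk : l.length ≤ 2 * span.card := by rw [hcardspan]; exact hseedlen
          omega
      · -- seed cell already painted: skip it
        have hsP : s ∈ P := by
          by_contra hnp
          have hcn := hcells s.1 s.2 hsx1 hsy1
          rw [if_neg (by simpa using hnp), hsOrig] at hcn
          exact h0 hcn
        have hval : pvScanLoop K.col K.R K.C (fuel + 1) g stk (P.card : Int)
            = pvScanLoop K.col K.R K.C fuel g stk.dropLast (P.card : Int) := by
          simp only [pvScanLoop, hlast]
          rw [if_pos h0]
        rw [hval]
        apply ih g stk.dropLast P ⟨hlen, hrect, hcells, hPreach⟩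
        · rcases hstart with h | h
          · exact Or.inl h
          · rcases (hmem _).mp h with h2 | h2
            · exact Or.inr h2
            · rw [h2]
              exact Or.inl hsP
        · exact fun c hc => hstk c ((hmem c).mpr (Or.inl hc))
        · intro p hp n hn
          rcases hcl p hp n hn with h | h
          · exact Or.inl h
          · rcases (hmem n).mp h with h2 | h2
            · exact Or.inr h2
            · rw [h2]
              exact Or.inl hsP
        · omega

theorem pv_headD_len (g : List (List Int)) (C0 : Nat) (hne : g ≠ [])
    (h : ∀ row ∈ g, row.length = C0) : (g.headD []).length = C0 := by
  cases g with
  | nil => exact absurd rfl hne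
  | cons r t => exact h r (List.mem_cons_self ..)

set_option maxHeartbeats 1000000 in
theorem pvMain (K : pvCtx) :
    paint_region K.G (K.sx, K.sy) K.col = paint_region_alt K.G (K.sx, K.sy) K.col := by
  have hcond : ¬ (pvCell K.G (K.sx, K.sy).1 (K.sx, K.sy).2 ≠ 0) := by simpa using K.hz
  have hGne : K.G ≠ [] := by
    intro h
    have h1 := K.hx0
    have h2 := K.hxR
    rw [h] at h2
    simp at h2
    omega
  have hg0len : (pvSetCell K.G K.sx K.sy K.col).length = K.G.length :=
    pvSetCell_length _ _ _ _
  have hg0rect : ∀ row ∈ pvSetCell K.G K.sx K.sy K.col, row.length = K.C0 :=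
    pvSetCell_rect K.G K.sx K.sy K.col K.C0 K.hx0 K.hxR K.hy0 K.rect
  have hg0ne : pvSetCell K.G K.sx K.sy K.col ≠ [] := by
    intro h
    rw [h] at hg0len
    simp at hg0len
    exact hGne (List.eq_nil_of_length_eq_zero hg0len.symm)
  have hhead0 : ((pvSetCell K.G K.sx K.sy K.col).headD []).length = K.C0 :=
    pv_headD_len _ K.C0 hg0ne hg0rect
  have hheadG : (K.G.headD []).length = K.C0 := pv_headD_len K.G K.C0 hGne K.rect
  have hA : paint_region K.G (K.sx, K.sy) K.col
      = pvBfsLoop K.col (K.G.length : Int) (K.C0 : Int) (2 * K.G.length * K.C0 + 1)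
          (pvSetCell K.G K.sx K.sy K.col) [(K.sx, K.sy)] 1 := by
    unfold paint_region
    rw [if_neg hcond]
    dsimp only
    rw [hg0len, hhead0]
  have hB : paint_region_alt K.G (K.sx, K.sy) K.col
      = pvScanLoop K.col (K.G.length : Int) (K.C0 : Int) ((2 * K.C0 + 2) * (K.G.length * K.C0) + 1)
          K.G [(K.sx, K.sy)] 0 := by
    unfold paint_region_alt
    rw [if_neg hcond]
    dsimp only
    rw [hheadG]
  have hrep0 : K.Rep (pvSetCell K.G K.sx K.sy K.col) {(K.sx, K.sy)} := by
    refine ⟨hg0len, hg0rect, ?_, ?_⟩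
    · intro a b ha hb
      rw [pvCell_pvSetCell K.G K.C0 K.rect K.sx K.sy K.col a b K.hx0 K.hxR K.hy0 K.hyC ha hb]
      by_cases hab : a = K.sx ∧ b = K.sy
      · rw [if_pos hab, if_pos (by simp [Prod.ext_iff, hab.1, hab.2])]
      · rw [if_neg hab, if_neg (by simpa [Prod.ext_iff] using hab)]
    · intro c hc
      simp at hc
      rw [hc]
      exact Relation.ReflTransGen.refl
  have hfuelA : 2 * ((K.box \ {(K.sx, K.sy)}).card)
      + ([(K.sx, K.sy)] : List (Int × Int)).length ≤ 2 * K.G.length * K.C0 + 1 := by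
    have hble : (K.box \ {(K.sx, K.sy)}).card ≤ K.box.card :=
      Finset.card_le_card Finset.sdiff_subset
    rw [pvBox_card] at hble
    simp only [List.length_cons, List.length_nil]
    rw [Nat.mul_assoc]
    omega
  obtain ⟨QA, hQAval, hQAmem⟩ :=
    pvBfs_loop K (2 * K.G.length * K.C0 + 1) (pvSetCell K.G K.sx K.sy K.col)
      [(K.sx, K.sy)] {(K.sx, K.sy)} hrep0 (Finset.mem_singleton_self _)
      (by intro c hc; simp at hc; simp [hc])
      (fun p hp => Or.inl (by simp at hp; simp [hp])) hfuelA
  have hrepB : K.Rep K.G ∅ := by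
    refine ⟨rfl, K.rect, ?_, by simp⟩
    intro a b _ _
    simp
  have hfuelB : (2 * K.C0 + 2) * ((K.box \ (∅ : Finset (Int × Int))).card)
      + ([(K.sx, K.sy)] : List (Int × Int)).length
      ≤ (2 * K.C0 + 2) * (K.G.length * K.C0) + 1 := by
    rw [Finset.sdiff_empty, pvBox_card]
    simp
  obtain ⟨QB, hQBval, hQBmem⟩ :=
    pvScan_loop K ((2 * K.C0 + 2) * (K.G.length * K.C0) + 1) K.G
      [(K.sx, K.sy)] ∅ hrepB (Or.inr (by simp))
      (by intro c hc; simp at hc; rw [hc]; exact Relation.ReflTransGen.refl)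
      (fun p hp => absurd hp (Finset.notMem_empty p)) hfuelB
  unfold pvCtx.R pvCtx.C at hQAval hQBval
  rw [Finset.card_singleton, Nat.cast_one] at hQAval
  rw [Finset.card_empty, Nat.cast_zero] at hQBval
  have hQ : QA = QB := Finset.ext fun c => by rw [hQAmem c, hQBmem c]
  rw [hA, hB, hQAval, hQBval, hQ]

-- ===== VERDICT (by name: the statement is the Claim_ definition above) =====
theorem paint_region_spec : Claim_equal_paint_region := by
  intro grid start color hdom hpre
  obtain ⟨sx, sy⟩ := start
  obtain ⟨-, -, hpre⟩ := hpre
  unfold Spec_paint_region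
  by_cases hc : pvCell grid sx sy = 0
  · obtain ⟨hrect, hx0, hxR, hy0, hyC, hcolNZ⟩ := hpre.resolve_left (by simpa using hc)
    exact pvMain ⟨grid, (grid.headD []).length, color, sx, sy, hrect, hcolNZ,
      hx0, hxR, hy0, hyC, hc⟩
  · unfold paint_region paint_region_alt
    rw [if_pos (by simpa using hc), if_pos (by simpa using hc)]
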